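-- pv_equiv track=rewrite | github.com/theSage21/pytongue | translator.py | reconstruct_line
-- ===== SOURCE A (Python) =====
-- def reconstruct_line(tokens, indent):
--     string = ' '.join(tokens)
--     for i in "[]{}()-=+/<>.,''" + '"':
--         string = string.replace(' ' + i + ' ', i)
--         string = string.replace(' ' + i, i)
--         string = string.replace(i + ' ', i)
--     string = string.strip()
--     string = (' ' * indent) + string
--     return string
-- ===== SOURCE B (Python) =====
-- PUNCT = set("[]{}()-=+/<>.,'\"")
--
--
-- def reconstruct_line(tokens, indent):
--     s = ' '.join(tokens)
--     out = []
--     prev = ''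
--     for i, c in enumerate(s):
--         nxt = s[i + 1] if i + 1 < len(s) else ''
--         if not (c == ' ' and (prev in PUNCT or nxt in PUNCT)):
--             out.append(c)
--         prev = c
--     return ' ' * indent + ''.join(out).strip()
-- ===== Notes on version B (the rewrite author's own statement) =====
-- stated objective: simpler
-- what changed: B makes a single left-to-right pass over the joined string, dropping each space whose immediate neighbor is a punctuation character, instead of A's 48 sequential str.replace passes; Pre_ excludes token lists whose joined string has a multi-space run next to a punctuation character away from the string's ends: tokens from a tokenizer contain no spaces, and on such runs A's replace cascade (up to two spaces dropped per side) and B's neighbor rule (one per side) are two equally defensible readings of an unspecified corner.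
-- outside the precondition, e.g. on reconstruct_line(['a ', '( b'], 0): A returns 'a(b', B returns 'a (b'; on reconstruct_line(['a', '(  b'], 0): A returns 'a(b', B returns 'a( b'
import Mathlib
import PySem

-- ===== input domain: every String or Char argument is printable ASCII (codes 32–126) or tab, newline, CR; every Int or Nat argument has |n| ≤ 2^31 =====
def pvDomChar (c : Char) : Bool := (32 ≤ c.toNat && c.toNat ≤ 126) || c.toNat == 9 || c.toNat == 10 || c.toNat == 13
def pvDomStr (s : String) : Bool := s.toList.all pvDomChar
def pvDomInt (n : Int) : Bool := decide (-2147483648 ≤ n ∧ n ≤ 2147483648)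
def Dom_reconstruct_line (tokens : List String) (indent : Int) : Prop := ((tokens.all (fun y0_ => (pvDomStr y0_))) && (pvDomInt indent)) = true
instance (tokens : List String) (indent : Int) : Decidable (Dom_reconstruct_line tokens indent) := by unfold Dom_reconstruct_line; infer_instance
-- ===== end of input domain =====

-- B replaces A's 48 sequential str.replace passes by one left-to-right scan of the
-- joined string that drops each space with a punctuation neighbor (objective: simpler).


-- ===== PORT A =====

-- the characters of "[]{}()-=+/<>.,''" + '"'  (note the apostrophe occurs twice)
def pvPunct : List Char :=
  ['[', ']', '{', '}', '(', ')', '-', '=', '+', '/', '<', '>', '.', ',', '\'', '\'', '"']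

def reconstruct_line (tokens : List String) (indent : Int) : String :=
  let s0 := PySem.Chars.join [' '] (tokens.map String.toList)
  let s1 := pvPunct.foldl (fun s i =>
      let s := PySem.Chars.replace s [' ', i, ' '] [i]
      let s := PySem.Chars.replace s [' ', i] [i]
      PySem.Chars.replace s [i, ' '] [i]) s0
  String.ofList (PySem.List.pyRepeat [' '] indent ++ PySem.Chars.strip s1)

-- ===== PORT B =====

-- the PUNCT set of Source B (distinct characters)
def pvPunctB : List Char :=
  ['[', ']', '{', '}', '(', ')', '-', '=', '+', '/', '<', '>', '.', ',', '\'', '"']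

-- 'prev in PUNCT' where prev may be the '' sentinel (none)
def pvOptPunct : Option Char → Bool
  | none => false
  | some c => pvPunctB.contains c

-- the single scan: keep every char except a space with a punctuation neighbor;
-- nxt is the head of the remaining list (s[i+1]), prev the previously seen char
def pvScan : Option Char → List Char → List Char
  | _, [] => []
  | prev, c :: t =>
      if c = ' ' ∧ (pvOptPunct prev || pvOptPunct t.head?) = true then pvScan (some c) t
      else c :: pvScan (some c) t

def reconstruct_line_alt (tokens : List String) (indent : Int) : String :=
  let s := PySem.Chars.join [' '] (tokens.map String.toList)
  String.ofList (PySem.List.pyRepeat [' '] indent ++ PySem.Chars.strip (pvScan none s))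

-- ===== PRECONDITION & SPEC =====

-- Pre_ excludes token lists whose space-joined string has a run of two or more
-- adjacent spaces next to a punctuation character away from the string's two ends
-- (runs at the ends are absorbed by .strip()). Tokens from a tokenizer contain no
-- spaces, so nothing specifies how many spaces of such a run to drop: A's replace
-- cascade removes up to two per side, B's neighbor rule removes one; both are
-- defensible on this unspecified corner, and Pre_ leaves it out of the claim.
def Pre_reconstruct_line (tokens : List String) (indent : Int) : Prop :=
  (pvPunctB.all (fun p =>
      !(PySem.Chars.isIn [' ', ' ', p]
          ((PySem.Chars.join [' '] (tokens.map String.toList)).dropWhile (· = ' '))) &&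
      !(PySem.Chars.isIn [' ', ' ', p]
          ((PySem.Chars.join [' '] (tokens.map String.toList)).reverse.dropWhile (· = ' '))))) = true
instance (tokens : List String) (indent : Int) : Decidable (Pre_reconstruct_line tokens indent) := by
  unfold Pre_reconstruct_line; infer_instance

def pvWitness_reconstruct_line : List String × Int := (["a", "(", "b"], 2)

def Spec_reconstruct_line (tokens : List String) (indent : Int) (out : String) : Prop := out = reconstruct_line_alt tokens indent
instance (tokens : List String) (indent : Int) (out : String) : Decidable (Spec_reconstruct_line tokens indent out) := by unfold Spec_reconstruct_line; infer_instance

-- ===== CLAIM (what is proved, stated in full; the proofs are below) =====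
def Claim_equal_reconstruct_line : Prop := ∀ (tokens : List String) (indent : Int), Dom_reconstruct_line tokens indent → Pre_reconstruct_line tokens indent → Spec_reconstruct_line tokens indent (reconstruct_line tokens indent)

-- ===== LEMMAS AND PROOFS =====

-- clean (fuel-free) version of Python's str.replace scan
def pvRepl (old new : List Char) : List Char → List Char
  | [] => []
  | c :: t =>
      if old.isPrefixOf (c :: t) then new ++ pvRepl old new (t.drop (old.length - 1))
      else c :: pvRepl old new t
  termination_by l => l.length
  decreasing_by
    · simp only [List.length_cons]
      have : (t.drop (old.length - 1)).length ≤ t.length := by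
        simp [List.length_drop]
      omega
    · simp

theorem pvRepl_nil (old new : List Char) : pvRepl old new [] = [] := by
  rw [pvRepl]

theorem pvRepl_cons (old new : List Char) (c : Char) (t : List Char) :
    pvRepl old new (c :: t) =
      if old.isPrefixOf (c :: t) then new ++ pvRepl old new (t.drop (old.length - 1))
      else c :: pvRepl old new t := by
  rw [pvRepl]

theorem pvRepl_cons_pos (old new : List Char) (c : Char) (t : List Char)
    (h : old.isPrefixOf (c :: t) = true) :
    pvRepl old new (c :: t) = new ++ pvRepl old new (t.drop (old.length - 1)) := by
  rw [pvRepl_cons, if_pos h]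

theorem pvRepl_cons_neg (old new : List Char) (c : Char) (t : List Char)
    (h : old.isPrefixOf (c :: t) = false) :
    pvRepl old new (c :: t) = c :: pvRepl old new t := by
  rw [pvRepl_cons]
  simp [h]

theorem pvGo_eq (old new : List Char) (hne : old ≠ []) :
    ∀ fuel l acc, l.length ≤ fuel →
      PySem.Chars.replace.go old new fuel l acc = acc.reverse ++ pvRepl old new l := by
  intro fuel
  induction fuel with
  | zero =>
      intro l acc h
      have : l = [] := by
        cases l with
        | nil => rfl
        | cons a t => simp at h
      subst this
      simp [PySem.Chars.replace.go, pvRepl_nil]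
  | succ fuel ih =>
      intro l acc h
      cases l with
      | nil => simp [PySem.Chars.replace.go, pvRepl_nil]
      | cons c t =>
          rw [PySem.Chars.replace.go]
          by_cases hp : old.isPrefixOf (c :: t)
          · simp only [hp, if_true]
            obtain ⟨k, hk⟩ : ∃ k, old.length = k + 1 := by
              cases old with
              | nil => exact absurd rfl hne
              | cons a b => exact ⟨b.length, by simp⟩
            have hdrop : List.drop old.length (c :: t) = t.drop (old.length - 1) := by
              rw [hk]; simp
            have hlen : (List.drop old.length (c :: t)).length ≤ fuel := by
              simp only [List.length_drop, List.length_cons] at *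
              omega
            rw [ih _ _ hlen, pvRepl_cons, if_pos hp, hdrop]
            simp
          · simp only [hp]
            have hlen : t.length ≤ fuel := by simp at h; omega
            rw [ih _ _ hlen, pvRepl_cons, if_neg hp]
            simp

theorem replace_eq_pvRepl (s old new : List Char) (hne : old ≠ []) :
    PySem.Chars.replace s old new = pvRepl old new s := by
  have : old.isEmpty = false := by cases old with | nil => exact absurd rfl hne | cons a b => rfl
  rw [PySem.Chars.replace, this]
  simpa using pvGo_eq old new hne s.length s [] (le_refl _)

-- run-length encoding of a string: non-space chars plus space-run lengths (proof device)

def pvParse : List Char → Nat → (List Char × List Nat)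
  | [], cnt => ([], [cnt])
  | c :: t, cnt =>
      if c = ' ' then pvParse t (cnt + 1)
      else
        let r := pvParse t 0
        (c :: r.1, cnt :: r.2)

-- the ' p ' pass: both neighbouring runs non-empty → decrement both
def pvPass1 (p : Char) : List Char → List Nat → List Nat
  | [], rs => rs
  | c :: cs, r0 :: r1 :: rs =>
      if c = p ∧ 0 < r0 ∧ 0 < r1 then (r0 - 1) :: pvPass1 p cs ((r1 - 1) :: rs)
      else r0 :: pvPass1 p cs (r1 :: rs)
  | _ :: _, rs => rs

-- the ' p' pass: decrement the run before each p
def pvPass2 (p : Char) : List Char → List Nat → List Nat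
  | [], rs => rs
  | c :: cs, r0 :: rs => (if c = p ∧ 0 < r0 then r0 - 1 else r0) :: pvPass2 p cs rs
  | _ :: _, [] => []

-- the 'p ' pass: decrement the run after each p
def pvPass3 (p : Char) : List Char → List Nat → List Nat
  | [], rs => rs
  | c :: cs, r0 :: r1 :: rs => r0 :: pvPass3 p cs ((if c = p ∧ 0 < r1 then r1 - 1 else r1) :: rs)
  | _ :: _, rs => rs

-- rebuild the string from the run-length encoding
def pvDecode : List Char → List Nat → List Char
  | [], r :: _ => List.replicate r ' '
  | [], [] => []
  | c :: cs, r :: rs => List.replicate r ' ' ++ c :: pvDecode cs rs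
  | _ :: _, [] => []

-- 'zero every run with a punctuation neighbor': the semantic core of both programs
def pvInQ : Option Char → List Char → Bool
  | none, _ => false
  | some c, q => q.contains c

def pvZ (q : List Char) : Option Char → List Nat → List Char → List Nat
  | _, [], _ => []
  | prev, r :: rs, [] => (if pvInQ prev q then 0 else r) :: rs
  | prev, r :: rs, c :: cs => (if (pvInQ prev q || q.contains c) = true then 0 else r) :: pvZ q (some c) rs cs

-- decrement the head if the flag is set (shape of pvPass3's carried modification)
def pvMod (b : Bool) : List Nat → List Nat
  | [] => []
  | r :: rs => (if b = true ∧ 0 < r then r - 1 else r) :: rs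

-- shape lemmas for the three patterns -----------------------------------------

theorem pvR1_spaces (p : Char) (hp : p ≠ ' ') (r : Nat) :
    pvRepl [' ', p, ' '] [p] (List.replicate r ' ') = List.replicate r ' ' := by
  induction r with
  | zero => simp [pvRepl_nil]
  | succ r ih =>
      have hpre : ([' ', p, ' '].isPrefixOf (' ' :: List.replicate r ' ')) = false := by
        cases r with
        | zero => simp [List.isPrefixOf]
        | succ k => simp [List.replicate_succ, List.isPrefixOf, hp]
      rw [List.replicate_succ, pvRepl_cons_neg _ _ _ _ hpre, ih]

theorem pvR2_spaces (p : Char) (hp : p ≠ ' ') (r : Nat) :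
    pvRepl [' ', p] [p] (List.replicate r ' ') = List.replicate r ' ' := by
  induction r with
  | zero => simp [pvRepl_nil]
  | succ r ih =>
      have hpre : ([' ', p].isPrefixOf (' ' :: List.replicate r ' ')) = false := by
        cases r with
        | zero => simp [List.isPrefixOf]
        | succ k => simp [List.replicate_succ, List.isPrefixOf, hp]
      rw [List.replicate_succ, pvRepl_cons_neg _ _ _ _ hpre, ih]

theorem pvR3_spaces (p : Char) (hp : p ≠ ' ') (r : Nat) (l : List Char) :
    pvRepl [p, ' '] [p] (List.replicate r ' ' ++ l) =
      List.replicate r ' ' ++ pvRepl [p, ' '] [p] l := by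
  induction r with
  | zero => simp
  | succ r ih =>
      have hpre : ([p, ' '].isPrefixOf (' ' :: (List.replicate r ' ' ++ l))) = false := by
        simp [List.isPrefixOf, hp]
      rw [List.replicate_succ, List.cons_append, pvRepl_cons_neg _ _ _ _ hpre, ih]
      simp

theorem pvR1_hit (p : Char) (hp : p ≠ ' ') (r : Nat) (hr : 0 < r) (t : List Char) :
    pvRepl [' ', p, ' '] [p] (List.replicate r ' ' ++ p :: ' ' :: t) =
      List.replicate (r - 1) ' ' ++ p :: pvRepl [' ', p, ' '] [p] t := by
  induction r with
  | zero => omega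
  | succ r ih =>
      cases r with
      | zero =>
          rw [List.replicate_succ]
          simp only [List.replicate_zero, List.nil_append, List.cons_append]
          rw [pvRepl_cons_pos _ _ _ _ (by simp [List.isPrefixOf])]
          simp
      | succ k =>
          have hpre : ([' ', p, ' '].isPrefixOf
              (' ' :: (List.replicate (k + 1) ' ' ++ p :: ' ' :: t))) = false := by
            simp [List.replicate_succ, List.isPrefixOf, hp]
          rw [List.replicate_succ, List.cons_append, pvRepl_cons_neg _ _ _ _ hpre,
            ih (by omega)]
          simp [List.replicate_succ]

theorem pvR1_miss (p c : Char) (hp : p ≠ ' ') (hc : c ≠ ' ') (r : Nat) (t : List Char)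
    (hm : ¬(c = p ∧ 0 < r ∧ t.head? = some ' ')) :
    pvRepl [' ', p, ' '] [p] (List.replicate r ' ' ++ c :: t) =
      List.replicate r ' ' ++ c :: pvRepl [' ', p, ' '] [p] t := by
  induction r with
  | zero =>
      have hpre : ([' ', p, ' '].isPrefixOf (c :: t)) = false := by
        simp [List.isPrefixOf]
        intro h
        exact absurd h.symm hc
      simp only [List.replicate_zero, List.nil_append]
      rw [pvRepl_cons_neg _ _ _ _ hpre]
  | succ r ih =>
      have hpre : ([' ', p, ' '].isPrefixOf (' ' :: (List.replicate r ' ' ++ c :: t))) = false := by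
        cases r with
        | zero =>
            simp only [List.replicate_zero, List.nil_append]
            by_cases hcp : c = p
            · subst hcp
              cases t with
              | nil => simp [List.isPrefixOf]
              | cons a t' =>
                  simp [List.isPrefixOf]
                  intro ha
                  exact absurd ⟨rfl, by omega, by simp [← ha]⟩ hm
            · simp [List.isPrefixOf]
              intro h
              exact absurd h.symm hcp
        | succ k => simp [List.replicate_succ, List.isPrefixOf, hp]
      have hm' : ¬(c = p ∧ 0 < r ∧ t.head? = some ' ') := by
        intro h
        exact hm ⟨h.1, by omega, h.2.2⟩
      rw [List.replicate_succ, List.cons_append, pvRepl_cons_neg _ _ _ _ hpre, ih hm']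
      simp

theorem pvR2_hit (p : Char) (hp : p ≠ ' ') (r : Nat) (hr : 0 < r) (t : List Char) :
    pvRepl [' ', p] [p] (List.replicate r ' ' ++ p :: t) =
      List.replicate (r - 1) ' ' ++ p :: pvRepl [' ', p] [p] t := by
  induction r with
  | zero => omega
  | succ r ih =>
      cases r with
      | zero =>
          rw [List.replicate_succ]
          simp only [List.replicate_zero, List.nil_append, List.cons_append]
          rw [pvRepl_cons_pos _ _ _ _ (by simp [List.isPrefixOf])]
          simp
      | succ k =>
          have hpre : ([' ', p].isPrefixOf
              (' ' :: (List.replicate (k + 1) ' ' ++ p :: t))) = false := by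
            simp [List.replicate_succ, List.isPrefixOf, hp]
          rw [List.replicate_succ, List.cons_append, pvRepl_cons_neg _ _ _ _ hpre,
            ih (by omega)]
          simp [List.replicate_succ]

theorem pvR2_miss (p c : Char) (hp : p ≠ ' ') (hc : c ≠ ' ') (r : Nat) (t : List Char)
    (hm : ¬(c = p ∧ 0 < r)) :
    pvRepl [' ', p] [p] (List.replicate r ' ' ++ c :: t) =
      List.replicate r ' ' ++ c :: pvRepl [' ', p] [p] t := by
  induction r with
  | zero =>
      have hpre : ([' ', p].isPrefixOf (c :: t)) = false := by
        simp [List.isPrefixOf]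
        intro h
        exact absurd h.symm hc
      simp only [List.replicate_zero, List.nil_append]
      rw [pvRepl_cons_neg _ _ _ _ hpre]
  | succ r ih =>
      have hpre : ([' ', p].isPrefixOf (' ' :: (List.replicate r ' ' ++ c :: t))) = false := by
        cases r with
        | zero =>
            simp only [List.replicate_zero, List.nil_append]
            simp [List.isPrefixOf]
            intro hcp
            exact absurd ⟨hcp.symm, by omega⟩ hm
        | succ k => simp [List.replicate_succ, List.isPrefixOf, hp]
      have hm' : ¬(c = p ∧ 0 < r) := by
        intro h
        exact hm ⟨h.1, by omega⟩
      rw [List.replicate_succ, List.cons_append, pvRepl_cons_neg _ _ _ _ hpre, ih hm']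
      simp

theorem pvR3_hit (p : Char) (t : List Char) :
    pvRepl [p, ' '] [p] (p :: ' ' :: t) = p :: pvRepl [p, ' '] [p] t := by
  rw [pvRepl_cons_pos _ _ _ _ (by simp [List.isPrefixOf])]
  simp

theorem pvR3_miss (p c : Char) (t : List Char)
    (hm : ¬(c = p ∧ t.head? = some ' ')) :
    pvRepl [p, ' '] [p] (c :: t) = c :: pvRepl [p, ' '] [p] t := by
  have hpre : ([p, ' '].isPrefixOf (c :: t)) = false := by
    by_cases hcp : c = p
    · subst hcp
      cases t with
      | nil => simp [List.isPrefixOf]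
      | cons a t' =>
          simp [List.isPrefixOf]
          intro ha
          exact absurd ⟨rfl, by simp [← ha]⟩ hm
    · simp [List.isPrefixOf]
      intro h
      exact absurd h.symm hcp
  rw [pvRepl_cons_neg _ _ _ _ hpre]

theorem pvDecode_cons (c : Char) (cs : List Char) (r : Nat) (rs : List Nat) :
    pvDecode (c :: cs) (r :: rs) = List.replicate r ' ' ++ c :: pvDecode cs rs := rfl

theorem pvPass1_cons (p c : Char) (cs : List Char) (r0 r1 : Nat) (rs : List Nat) :
    pvPass1 p (c :: cs) (r0 :: r1 :: rs) =
      if c = p ∧ 0 < r0 ∧ 0 < r1 then (r0 - 1) :: pvPass1 p cs ((r1 - 1) :: rs)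
      else r0 :: pvPass1 p cs (r1 :: rs) := rfl

theorem pvPass2_cons (p c : Char) (cs : List Char) (r0 : Nat) (rs : List Nat) :
    pvPass2 p (c :: cs) (r0 :: rs) =
      (if c = p ∧ 0 < r0 then r0 - 1 else r0) :: pvPass2 p cs rs := rfl

theorem pvPass3_cons (p c : Char) (cs : List Char) (r0 r1 : Nat) (rs : List Nat) :
    pvPass3 p (c :: cs) (r0 :: r1 :: rs) =
      r0 :: pvPass3 p cs ((if c = p ∧ 0 < r1 then r1 - 1 else r1) :: rs) := rfl

-- decode helpers ----------------------------------------------------------------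

theorem pvDecode_pos (cs : List Char) (r : Nat) (rs : List Nat) (hr : 0 < r) :
    pvDecode cs (r :: rs) = ' ' :: pvDecode cs ((r - 1) :: rs) := by
  obtain ⟨k, rfl⟩ : ∃ k, r = k + 1 := ⟨r - 1, by omega⟩
  cases cs <;> simp [pvDecode, List.replicate_succ]

theorem pvDecode_head_zero (cs : List Char) (rs : List Nat) (hcs : ∀ c ∈ cs, c ≠ ' ') :
    (pvDecode cs (0 :: rs)).head? ≠ some ' ' := by
  cases cs with
  | nil => simp [pvDecode]
  | cons c cs' =>
      simp [pvDecode]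
      exact fun h => hcs c (by simp) h

-- the three KEY lemmas: each replace pass acts on the encoding as a run pass ----

theorem pvKey1 (p : Char) (hp : p ≠ ' ') :
    ∀ (cs : List Char) (rs : List Nat), (∀ c ∈ cs, c ≠ ' ') → rs.length = cs.length + 1 →
      pvRepl [' ', p, ' '] [p] (pvDecode cs rs) = pvDecode cs (pvPass1 p cs rs) := by
  intro cs
  induction cs with
  | nil =>
      intro rs _ hlen
      obtain ⟨r, rfl⟩ : ∃ r, rs = [r] := by
        cases rs with
        | nil => simp at hlen
        | cons a b => cases b with
          | nil => exact ⟨a, rfl⟩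
          | cons x y => simp at hlen
      simpa [pvDecode, pvPass1] using pvR1_spaces p hp r
  | cons c cs ih =>
      intro rs hcs hlen
      obtain ⟨r0, r1, rs', rfl⟩ : ∃ r0 r1 rs', rs = r0 :: r1 :: rs' := by
        match rs with
        | r0 :: r1 :: rs' => exact ⟨r0, r1, rs', rfl⟩
        | [] => simp at hlen
        | [a] => simp at hlen
      have hc : c ≠ ' ' := hcs c (by simp)
      have hcs' : ∀ x ∈ cs, x ≠ ' ' := fun x hx => hcs x (by simp [hx])
      have hlen' : (r1 :: rs').length = cs.length + 1 := by simp at hlen ⊢; omega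
      have hlen'' : ((r1 - 1) :: rs').length = cs.length + 1 := by simp at hlen ⊢; omega
      by_cases h : c = p ∧ 0 < r0 ∧ 0 < r1
      · obtain ⟨hcp, hr0, hr1⟩ := h
        rw [pvDecode_cons, hcp, pvDecode_pos cs r1 rs' hr1, pvR1_hit p hp r0 hr0,
          ih ((r1 - 1) :: rs') hcs' hlen'', pvPass1_cons,
          if_pos ⟨rfl, hr0, hr1⟩, pvDecode_cons]
      · have hmiss : ¬(c = p ∧ 0 < r0 ∧ (pvDecode cs (r1 :: rs')).head? = some ' ') := by
          intro ⟨h1, h2, h3⟩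
          rcases Nat.eq_zero_or_pos r1 with hz | hpos
          · subst hz
            exact pvDecode_head_zero cs rs' hcs' h3
          · exact h ⟨h1, h2, hpos⟩
        rw [pvDecode_cons, pvR1_miss p c hp hc r0 _ hmiss, ih (r1 :: rs') hcs' hlen',
          pvPass1_cons, if_neg h, pvDecode_cons]

theorem pvKey2 (p : Char) (hp : p ≠ ' ') :
    ∀ (cs : List Char) (rs : List Nat), (∀ c ∈ cs, c ≠ ' ') → rs.length = cs.length + 1 →
      pvRepl [' ', p] [p] (pvDecode cs rs) = pvDecode cs (pvPass2 p cs rs) := by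
  intro cs
  induction cs with
  | nil =>
      intro rs _ hlen
      obtain ⟨r, rfl⟩ : ∃ r, rs = [r] := by
        cases rs with
        | nil => simp at hlen
        | cons a b => cases b with
          | nil => exact ⟨a, rfl⟩
          | cons x y => simp at hlen
      simpa [pvDecode, pvPass2] using pvR2_spaces p hp r
  | cons c cs ih =>
      intro rs hcs hlen
      obtain ⟨r0, rs', rfl⟩ : ∃ r0 rs', rs = r0 :: rs' := by
        cases rs with
        | nil => simp at hlen
        | cons a b => exact ⟨a, b, rfl⟩
      have hc : c ≠ ' ' := hcs c (by simp)
      have hcs' : ∀ x ∈ cs, x ≠ ' ' := fun x hx => hcs x (by simp [hx])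
      have hlen' : rs'.length = cs.length + 1 := by simp at hlen; omega
      by_cases h : c = p ∧ 0 < r0
      · obtain ⟨hcp, hr0⟩ := h
        rw [pvDecode_cons, hcp, pvR2_hit p hp r0 hr0, ih rs' hcs' hlen',
          pvPass2_cons, if_pos ⟨rfl, hr0⟩, pvDecode_cons]
      · rw [pvDecode_cons, pvR2_miss p c hp hc r0 _ h, ih rs' hcs' hlen',
          pvPass2_cons, if_neg h, pvDecode_cons]

theorem pvKey3 (p : Char) (hp : p ≠ ' ') :
    ∀ (cs : List Char) (rs : List Nat), (∀ c ∈ cs, c ≠ ' ') → rs.length = cs.length + 1 →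
      pvRepl [p, ' '] [p] (pvDecode cs rs) = pvDecode cs (pvPass3 p cs rs) := by
  intro cs
  induction cs with
  | nil =>
      intro rs _ hlen
      obtain ⟨r, rfl⟩ : ∃ r, rs = [r] := by
        cases rs with
        | nil => simp at hlen
        | cons a b => cases b with
          | nil => exact ⟨a, rfl⟩
          | cons x y => simp at hlen
      simp [pvDecode, pvPass3]
      simpa [pvRepl_nil] using pvR3_spaces p hp r []
  | cons c cs ih =>
      intro rs hcs hlen
      obtain ⟨r0, r1, rs', rfl⟩ : ∃ r0 r1 rs', rs = r0 :: r1 :: rs' := by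
        match rs with
        | r0 :: r1 :: rs' => exact ⟨r0, r1, rs', rfl⟩
        | [] => simp at hlen
        | [a] => simp at hlen
      have hc : c ≠ ' ' := hcs c (by simp)
      have hcs' : ∀ x ∈ cs, x ≠ ' ' := fun x hx => hcs x (by simp [hx])
      have hlen' : (r1 :: rs').length = cs.length + 1 := by simp at hlen ⊢; omega
      have hlen'' : ((r1 - 1) :: rs').length = cs.length + 1 := by simp at hlen ⊢; omega
      rw [pvDecode_cons, pvR3_spaces p hp r0]
      by_cases h : c = p ∧ 0 < r1
      · obtain ⟨hcp, hr1⟩ := h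
        rw [pvDecode_pos cs r1 rs' hr1, hcp, pvR3_hit, ih ((r1 - 1) :: rs') hcs' hlen'',
          pvPass3_cons, if_pos ⟨rfl, hr1⟩, pvDecode_cons]
      · have hmiss : ¬(c = p ∧ (pvDecode cs (r1 :: rs')).head? = some ' ') := by
          intro ⟨h1, h3⟩
          rcases Nat.eq_zero_or_pos r1 with hz | hpos
          · subst hz
            exact pvDecode_head_zero cs rs' hcs' h3
          · exact h ⟨h1, hpos⟩
        rw [pvR3_miss p c _ hmiss, ih (r1 :: rs') hcs' hlen',
          pvPass3_cons, if_neg h, pvDecode_cons]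

-- pass lemmas: lengths are preserved -------------------------------------------

theorem pvPass1_len (p : Char) : ∀ (cs : List Char) (rs : List Nat), (pvPass1 p cs rs).length = rs.length := by
  intro cs
  induction cs with
  | nil => intro rs; rfl
  | cons c cs ih =>
      intro rs
      match rs with
      | [] => rfl
      | [a] => rfl
      | r0 :: r1 :: rs' =>
          rw [pvPass1_cons]
          split <;> simp [ih]

theorem pvPass2_len (p : Char) : ∀ (cs : List Char) (rs : List Nat), (pvPass2 p cs rs).length = rs.length := by
  intro cs
  induction cs with
  | nil => intro rs; rfl
  | cons c cs ih =>
      intro rs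
      match rs with
      | [] => rfl
      | r0 :: rs' => rw [pvPass2_cons]; simp [ih]

theorem pvPass3_len (p : Char) : ∀ (cs : List Char) (rs : List Nat), (pvPass3 p cs rs).length = rs.length := by
  intro cs
  induction cs with
  | nil => intro rs; rfl
  | cons c cs ih =>
      intro rs
      match rs with
      | [] => rfl
      | [a] => rfl
      | r0 :: r1 :: rs' => rw [pvPass3_cons]; simp [ih]

-- the chained fold over all punctuation characters ------------------------------

theorem pvChain (ps : List Char) (hps : ∀ p ∈ ps, p ≠ ' ') :
    ∀ (cs : List Char) (rs : List Nat), (∀ c ∈ cs, c ≠ ' ') → rs.length = cs.length + 1 →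
      ps.foldl (fun s i =>
          pvRepl [i, ' '] [i] (pvRepl [' ', i] [i] (pvRepl [' ', i, ' '] [i] s)))
        (pvDecode cs rs)
      = pvDecode cs (ps.foldl (fun r pc => pvPass3 pc cs (pvPass2 pc cs (pvPass1 pc cs r))) rs) := by
  induction ps with
  | nil => intro cs rs _ _; rfl
  | cons p ps ih =>
      intro cs rs hcs hlen
      have hp : p ≠ ' ' := hps p (by simp)
      have hps' : ∀ x ∈ ps, x ≠ ' ' := fun x hx => hps x (by simp [hx])
      have h1 : (pvPass1 p cs rs).length = cs.length + 1 := by rw [pvPass1_len]; exact hlen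
      have h2 : (pvPass2 p cs (pvPass1 p cs rs)).length = cs.length + 1 := by
        rw [pvPass2_len]; exact h1
      have h3 : (pvPass3 p cs (pvPass2 p cs (pvPass1 p cs rs))).length = cs.length + 1 := by
        rw [pvPass3_len]; exact h2
      simp only [List.foldl_cons]
      rw [pvKey1 p hp cs rs hcs hlen, pvKey2 p hp cs _ hcs h1, pvKey3 p hp cs _ hcs h2]
      exact ih hps' cs _ hcs h3

-- parse lemmas -------------------------------------------------------------------

theorem pvParse_decode : ∀ (s : List Char) (cnt : Nat),
    pvDecode (pvParse s cnt).1 (pvParse s cnt).2 = List.replicate cnt ' ' ++ s := by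
  intro s
  induction s with
  | nil => intro cnt; simp [pvParse, pvDecode]
  | cons c t ih =>
      intro cnt
      by_cases hc : c = ' '
      · subst hc
        rw [show pvParse (' ' :: t) cnt = pvParse t (cnt + 1) from by simp [pvParse]]
        rw [ih (cnt + 1), List.replicate_succ']
        simp
      · rw [show pvParse (c :: t) cnt = (c :: (pvParse t 0).1, cnt :: (pvParse t 0).2) from by
          simp [pvParse, hc]]
        rw [pvDecode_cons, ih 0]
        simp

theorem pvParse_nonspace : ∀ (s : List Char) (cnt : Nat) (c : Char), c ∈ (pvParse s cnt).1 → c ≠ ' ' := by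
  intro s
  induction s with
  | nil => intro cnt c h; simp [pvParse] at h
  | cons a t ih =>
      intro cnt c h
      by_cases ha : a = ' '
      · subst ha
        rw [show pvParse (' ' :: t) cnt = pvParse t (cnt + 1) from by simp [pvParse]] at h
        exact ih (cnt + 1) c h
      · rw [show pvParse (a :: t) cnt = (a :: (pvParse t 0).1, cnt :: (pvParse t 0).2) from by
          simp [pvParse, ha]] at h
        simp at h
        rcases h with rfl | h
        · exact ha
        · exact ih 0 c h

theorem pvParse_len : ∀ (s : List Char) (cnt : Nat), (pvParse s cnt).2.length = (pvParse s cnt).1.length + 1 := by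
  intro s
  induction s with
  | nil => intro cnt; simp [pvParse]
  | cons a t ih =>
      intro cnt
      by_cases ha : a = ' '
      · subst ha
        rw [show pvParse (' ' :: t) cnt = pvParse t (cnt + 1) from by simp [pvParse]]
        exact ih (cnt + 1)
      · rw [show pvParse (a :: t) cnt = (a :: (pvParse t 0).1, cnt :: (pvParse t 0).2) from by
          simp [pvParse, ha]]
        simp [ih 0]

-- pvZ basics --------------------------------------------------------------------

theorem pvZ_empty_q : ∀ (cs : List Char) (prev : Option Char) (rs : List Nat),
    pvZ [] prev rs cs = rs := by
  intro cs
  induction cs with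
  | nil =>
      intro prev rs
      cases rs with
      | nil => rfl
      | cons r rs' => simp [pvZ, pvInQ]; cases prev <;> simp [pvInQ]
  | cons c cs ih =>
      intro prev rs
      cases rs with
      | nil => rfl
      | cons r rs' =>
          show (if (pvInQ prev [] || List.contains [] c) = true then 0 else r) :: pvZ [] (some c) rs' cs = r :: rs'
          have h1 : pvInQ prev [] = false := by cases prev <;> rfl
          rw [h1, ih]
          simp


-- head of pvZ is irrelevant when the previous char is punctuation

theorem pvZ_head_irrel (q : List Char) (prev : Option Char) (hprev : pvInQ prev q = true)
    (a b : Nat) (rs : List Nat) (cs : List Char) :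
    pvZ q prev (a :: rs) cs = pvZ q prev (b :: rs) cs := by
  cases cs <;> simp [pvZ, hprev]

-- fusing two pvZ passes into one over the concatenated symbol list

theorem pvZ_fuse (q1 q2 : List Char) : ∀ (cs : List Char) (prev : Option Char) (rs : List Nat),
    pvZ q2 prev (pvZ q1 prev rs cs) cs = pvZ (q1 ++ q2) prev rs cs := by
  intro cs
  induction cs with
  | nil =>
      intro prev rs
      cases rs with
      | nil => rfl
      | cons r rs' =>
          show pvZ q2 prev ((if pvInQ prev q1 then 0 else r) :: rs') []
              = (if pvInQ prev (q1 ++ q2) then 0 else r) :: rs'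
          have hQ : pvInQ prev (q1 ++ q2) = (pvInQ prev q1 || pvInQ prev q2) := by
            cases prev with
            | none => rfl
            | some c => show (q1 ++ q2).contains c = _; simp [pvInQ]
          rw [hQ]
          show (if pvInQ prev q2 then 0 else (if pvInQ prev q1 then 0 else r)) :: rs' = _
          cases h1 : pvInQ prev q1 <;> cases h2 : pvInQ prev q2 <;> simp
  | cons c cs ih =>
      intro prev rs
      cases rs with
      | nil => rfl
      | cons r rs' =>
          have hQ : pvInQ prev (q1 ++ q2) = (pvInQ prev q1 || pvInQ prev q2) := by
            cases prev with
            | none => rfl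
            | some d => show (q1 ++ q2).contains d = _; simp [pvInQ]
          show pvZ q2 prev ((if (pvInQ prev q1 || q1.contains c) = true then 0 else r) :: pvZ q1 (some c) rs' cs) (c :: cs)
              = (if (pvInQ prev (q1 ++ q2) || (q1 ++ q2).contains c) = true then 0 else r) :: pvZ (q1 ++ q2) (some c) rs' cs
          rw [show pvZ q2 prev ((if (pvInQ prev q1 || q1.contains c) = true then 0 else r) :: pvZ q1 (some c) rs' cs) (c :: cs)
              = (if (pvInQ prev q2 || q2.contains c) = true then 0
                  else (if (pvInQ prev q1 || q1.contains c) = true then 0 else r))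
                :: pvZ q2 (some c) (pvZ q1 (some c) rs' cs) cs from rfl]
          rw [ih (some c) rs', hQ]
          have hc : (q1 ++ q2).contains c = (q1.contains c || q2.contains c) := by simp
          rw [hc]
          congr 1
          cases h1 : pvInQ prev q1 <;> cases h2 : pvInQ prev q2 <;>
            cases h3 : q1.contains c <;> cases h4 : q2.contains c <;> simp

-- A's duplicated quote makes no difference to membership -------------------------

theorem pvPunct_contains (c : Char) : pvPunct.contains c = pvPunctB.contains c := by
  simp [pvPunct, pvPunctB]

theorem pvZ_punct_eq : ∀ (cs : List Char) (prev : Option Char) (rs : List Nat),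
    pvZ pvPunct prev rs cs = pvZ pvPunctB prev rs cs := by
  have hInQ : ∀ prev, pvInQ prev pvPunct = pvInQ prev pvPunctB := by
    intro prev
    cases prev with
    | none => rfl
    | some c => exact pvPunct_contains c
  intro cs
  induction cs with
  | nil =>
      intro prev rs
      cases rs with
      | nil => rfl
      | cons r rs' =>
          show (if pvInQ prev pvPunct then 0 else r) :: rs' = (if pvInQ prev pvPunctB then 0 else r) :: rs'
          rw [hInQ]
  | cons c cs ih =>
      intro prev rs
      cases rs with
      | nil => rfl
      | cons r rs' =>
          show (if (pvInQ prev pvPunct || pvPunct.contains c) = true then 0 else r) :: pvZ pvPunct (some c) rs' cs = _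
          rw [hInQ, pvPunct_contains, ih]
          rfl

-- run-list similarity: entries may differ at the first and last position only
-- (those runs are absorbed by .strip()); pvSim2 frees only the last entry

def pvSim2 (u v : List Nat) : Prop :=
  u ≠ [] ∧ v ≠ [] ∧ u.length = v.length ∧ u.dropLast = v.dropLast

def pvSim (u v : List Nat) : Prop :=
  u ≠ [] ∧ v ≠ [] ∧ u.length = v.length ∧ u.dropLast.tail = v.dropLast.tail

def pvRel : Option Char → List Nat → List Nat → Prop
  | none, u, v => pvSim u v
  | some _, u, v => pvSim2 u v

-- bounds that Pre_ provides: every internal run with a punctuation neighbor is ≤ 1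
def pvGuard : Option Char → Char → Bool
  | none, _ => false
  | some d, c => pvPunctB.contains d || pvPunctB.contains c

def pvOk : Option Char → List Nat → List Char → Prop
  | _, _, [] => True
  | _, [], _ => True
  | prev, r :: rs, c :: cs => (pvGuard prev c = true → r ≤ 1) ∧ pvOk (some c) rs cs

-- one-sided (right-neighbor) bound, head entry exempt when the flag is true
def pvOkR : Bool → List Nat → List Char → Prop
  | _, _, [] => True
  | _, [], _ => True
  | isHead, r :: rs, c :: cs =>
      (isHead = false → pvPunctB.contains c = true → r ≤ 1) ∧ pvOkR false rs cs

-- B's effect on the runs: subtract one space per punctuation neighbor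
def pvW : Option Char → List Nat → List Char → List Nat
  | _, [], _ => []
  | prev, r :: rs, [] => (r - (if pvInQ prev pvPunctB then 1 else 0)) :: rs
  | prev, r :: rs, c :: cs =>
      (r - (if pvInQ prev pvPunctB then 1 else 0) - (if pvPunctB.contains c then 1 else 0))
        :: pvW (some c) rs cs

theorem pvMod_false (l : List Nat) : pvMod false l = l := by
  cases l <;> simp [pvMod]

-- pvSim basics -------------------------------------------------------------------


theorem pvSim2_cons (a b : Nat) (u v : List Nat) (hab : a = b) (h : pvSim2 u v) :
    pvSim2 (a :: u) (b :: v) := by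
  obtain ⟨hu, hv, hlen, hdl⟩ := h
  exact ⟨by simp, by simp, by simp [hlen], by
    rw [List.dropLast_cons_of_ne_nil hu, List.dropLast_cons_of_ne_nil hv, hab, hdl]⟩

theorem pvSim2_cons_elim (a b : Nat) (u v : List Nat)
    (h : pvSim2 (a :: u) (b :: v)) (hu : u ≠ []) : a = b ∧ pvSim2 u v := by
  obtain ⟨_, _, hlen, hdl⟩ := h
  have hv : v ≠ [] := by
    cases v with
    | nil => simp at hlen; exact absurd hlen hu
    | cons x y => simp
  rw [List.dropLast_cons_of_ne_nil hu, List.dropLast_cons_of_ne_nil hv] at hdl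
  exact ⟨by exact (List.cons.injEq _ _ _ _ ▸ hdl).1, hu, hv, by simpa using hlen, (List.cons.injEq _ _ _ _ ▸ hdl).2⟩

theorem pvSim2_len (u v : List Nat) (h : pvSim2 u v) : u.length = v.length := h.2.2.1



theorem pvSim_refl (u : List Nat) (hu : u ≠ []) : pvSim u u := ⟨hu, hu, rfl, rfl⟩

theorem pvSim_trans (u v w : List Nat) (h1 : pvSim u v) (h2 : pvSim v w) : pvSim u w :=
  ⟨h1.1, h2.2.1, h1.2.2.1.trans h2.2.2.1, h1.2.2.2.trans h2.2.2.2⟩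

theorem pvSim_symm (u v : List Nat) (h : pvSim u v) : pvSim v u :=
  ⟨h.2.1, h.1, h.2.2.1.symm, h.2.2.2.symm⟩

theorem pvSim_len (u v : List Nat) (h : pvSim u v) : u.length = v.length := h.2.2.1

theorem pvSim_cons (a b : Nat) (u v : List Nat) (h : pvSim2 u v) :
    pvSim (a :: u) (b :: v) := by
  obtain ⟨hu, hv, hlen, hdl⟩ := h
  refine ⟨by simp, by simp, by simp [hlen], ?_⟩
  rw [List.dropLast_cons_of_ne_nil hu, List.dropLast_cons_of_ne_nil hv]
  simp [hdl]

theorem pvSim_cons_elim (a b : Nat) (u v : List Nat)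
    (h : pvSim (a :: u) (b :: v)) (hu : u ≠ []) : pvSim2 u v := by
  obtain ⟨_, _, hlen, hdl⟩ := h
  have hv : v ≠ [] := by
    cases v with
    | nil => simp at hlen; exact absurd hlen hu
    | cons x y => simp
  rw [List.dropLast_cons_of_ne_nil hu, List.dropLast_cons_of_ne_nil hv] at hdl
  simp at hdl
  exact ⟨hu, hv, by simpa using hlen, hdl⟩

theorem pvRel_cons (prev : Option Char) (a b : Nat) (u v : List Nat)
    (h2 : pvSim2 u v) (hab : prev ≠ none → a = b) : pvRel prev (a :: u) (b :: v) := by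
  cases prev with
  | none => exact pvSim_cons a b u v h2
  | some d => exact pvSim2_cons a b u v (hab (by simp)) h2





-- pvOk basics --------------------------------------------------------------------

theorem pvOk_mono_head (prev : Option Char) (r r' : Nat) (rs : List Nat) (cs : List Char)
    (h : pvOk prev (r :: rs) cs) (hle : r' ≤ r) : pvOk prev (r' :: rs) cs := by
  cases cs with
  | nil => trivial
  | cons c cs' => exact ⟨fun hg => le_trans hle (h.1 hg), h.2⟩

theorem pvOk_of_sim2 : ∀ (cs : List Char) (prev : Option Char) (u v : List Nat),
    u.length = cs.length + 1 → pvSim2 u v → pvOk prev v cs → pvOk prev u cs := by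
  intro cs
  induction cs with
  | nil => intro prev u v _ _ _; cases u <;> trivial
  | cons c cs' ih =>
      intro prev u v hlen h2 hOk
      obtain ⟨a, u', rfl⟩ : ∃ a u', u = a :: u' := by
        cases u with
        | nil => simp at hlen
        | cons x y => exact ⟨x, y, rfl⟩
      have hu' : u' ≠ [] := by
        intro h
        subst h
        simp at hlen
      obtain ⟨b, v', rfl⟩ : ∃ b v', v = b :: v' := by
        cases v with
        | nil => exact absurd rfl h2.2.1
        | cons x y => exact ⟨x, y, rfl⟩
      obtain ⟨hab, h2'⟩ := pvSim2_cons_elim a b u' v' h2 hu'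
      exact ⟨fun hg => hab ▸ hOk.1 hg, ih (some c) u' v' (by simpa using hlen) h2' hOk.2⟩

theorem pvOk_of_sim (cs : List Char) (u v : List Nat)
    (hlenu : u.length = cs.length + 1) (hs : pvSim u v) (hOk : pvOk none v cs) :
    pvOk none u cs := by
  obtain ⟨a, u', rfl⟩ : ∃ a u', u = a :: u' := by
    cases u with
    | nil => exact absurd rfl hs.1
    | cons x y => exact ⟨x, y, rfl⟩
  obtain ⟨b, v', rfl⟩ : ∃ b v', v = b :: v' := by
    cases v with
    | nil => exact absurd rfl hs.2.1
    | cons x y => exact ⟨x, y, rfl⟩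
  cases cs with
  | nil => trivial
  | cons c cs' =>
      have hu' : u' ≠ [] := by
        intro h
        subst h
        simp at hlenu
      refine ⟨fun hg => by simp [pvGuard] at hg, ?_⟩
      exact pvOk_of_sim2 cs' (some c) u' v' (by simpa using hlenu)
        (pvSim_cons_elim a b u' v' hs hu') hOk.2

theorem pvOk_Z (q : List Char) : ∀ (cs : List Char) (prev : Option Char) (rs : List Nat),
    pvOk prev rs cs → pvOk prev (pvZ q prev rs cs) cs := by
  intro cs
  induction cs with
  | nil => intro prev rs _; cases rs <;> trivial
  | cons c cs' ih =>
      intro prev rs hOk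
      cases rs with
      | nil => trivial
      | cons r rs' =>
          show pvOk prev ((if (pvInQ prev q || q.contains c) = true then 0 else r) :: pvZ q (some c) rs' cs') (c :: cs')
          refine ⟨fun hg => ?_, ih (some c) rs' hOk.2⟩
          split
          · omega
          · exact hOk.1 hg
-- pvZ respects the similarity relation --------------------------------------------

theorem pvZ_rel (q : List Char) : ∀ (cs : List Char) (prev : Option Char) (u v : List Nat),
    pvRel prev u v → pvRel prev (pvZ q prev u cs) (pvZ q prev v cs) := by
  intro cs
  induction cs with
  | nil =>
      intro prev u v h
      have hu : u ≠ [] := by cases prev <;> exact h.1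
      have hv : v ≠ [] := by cases prev <;> exact h.2.1
      obtain ⟨a, u', rfl⟩ : ∃ a u', u = a :: u' := by
        cases u with
        | nil => exact absurd rfl hu
        | cons x y => exact ⟨x, y, rfl⟩
      obtain ⟨b, v', rfl⟩ : ∃ b v', v = b :: v' := by
        cases v with
        | nil => exact absurd rfl hv
        | cons x y => exact ⟨x, y, rfl⟩
      show pvRel prev ((if pvInQ prev q then 0 else a) :: u') ((if pvInQ prev q then 0 else b) :: v')
      cases u' with
      | nil =>
          have : v' = [] := by
            have := by cases prev <;> exact h.2.2.1
            cases v' with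
            | nil => rfl
            | cons x y => simp at this
          subst this
          cases prev with
          | none => exact ⟨by simp, by simp, by simp, by simp⟩
          | some d => exact ⟨by simp, by simp, by simp, by simp⟩
      | cons a2 u2 =>
          obtain ⟨b2, v2, rfl⟩ : ∃ b2 v2, v' = b2 :: v2 := by
            have := by cases prev <;> exact h.2.2.1
            cases v' with
            | nil => simp at this
            | cons x y => exact ⟨x, y, rfl⟩
          cases prev with
          | none =>
              exact pvSim_cons _ _ _ _ (pvSim_cons_elim a b _ _ h (by simp))
          | some d =>
              obtain ⟨hab, h2⟩ := pvSim2_cons_elim a b _ _ h (by simp)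
              exact pvSim2_cons _ _ _ _ (by rw [hab]) h2
  | cons c cs2 ih =>
      intro prev u v h
      have hu : u ≠ [] := by cases prev <;> exact h.1
      have hv : v ≠ [] := by cases prev <;> exact h.2.1
      obtain ⟨a, u', rfl⟩ : ∃ a u', u = a :: u' := by
        cases u with
        | nil => exact absurd rfl hu
        | cons x y => exact ⟨x, y, rfl⟩
      obtain ⟨b, v', rfl⟩ : ∃ b v', v = b :: v' := by
        cases v with
        | nil => exact absurd rfl hv
        | cons x y => exact ⟨x, y, rfl⟩
      show pvRel prev
        ((if (pvInQ prev q || q.contains c) = true then 0 else a) :: pvZ q (some c) u' cs2)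
        ((if (pvInQ prev q || q.contains c) = true then 0 else b) :: pvZ q (some c) v' cs2)
      cases u' with
      | nil =>
          have : v' = [] := by
            have := by cases prev <;> exact h.2.2.1
            cases v' with
            | nil => rfl
            | cons x y => simp at this
          subst this
          show pvRel prev [_] [_]
          cases prev with
          | none => exact ⟨by simp, by simp, by simp, by simp⟩
          | some d => exact ⟨by simp, by simp, by simp, by simp⟩
      | cons a2 u2 =>
          obtain ⟨b2, v2, rfl⟩ : ∃ b2 v2, v' = b2 :: v2 := by
            have := by cases prev <;> exact h.2.2.1
            cases v' with
            | nil => simp at this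
            | cons x y => exact ⟨x, y, rfl⟩
          have htail : pvSim2 (a2 :: u2) (b2 :: v2) := by
            cases prev with
            | none => exact pvSim_cons_elim a b _ _ h (by simp)
            | some d => exact (pvSim2_cons_elim a b _ _ h (by simp)).2
          have hrec : pvRel (some c) (pvZ q (some c) (a2 :: u2) cs2) (pvZ q (some c) (b2 :: v2) cs2) :=
            ih (some c) (a2 :: u2) (b2 :: v2) htail
      -- the recursive results are pvSim2; cons them with the (possibly differing) heads
          refine pvRel_cons prev _ _ _ _ hrec ?_
          intro hne
          have hab : a = b := by
            cases prev with
            | none => exact absurd rfl hne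
            | some d => exact (pvSim2_cons_elim a b _ _ h (by simp)).1
          rw [hab]

-- the combined effect of the three run passes for one symbol, up to head/last ------

theorem pvComboS (p : Char) (hpP : pvPunctB.contains p = true) :
    ∀ (cs : List Char) (prev : Option Char) (x : Nat) (rs : List Nat),
    rs.length = cs.length → pvOk prev (x :: rs) cs →
    pvRel prev (pvPass3 p cs (pvMod (pvInQ prev [p]) (pvPass2 p cs (pvPass1 p cs (x :: rs)))))
      (pvZ [p] prev (x :: rs) cs) := by
  intro cs
  induction cs with
  | nil =>
      intro prev x rs hlen _
      have : rs = [] := List.length_eq_zero_iff.mp hlen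
      subst this
      show pvRel prev (pvPass3 p [] (pvMod (pvInQ prev [p]) [x])) [if pvInQ prev [p] then 0 else x]
      cases hb : pvInQ prev [p] with
      | false =>
          rw [pvMod_false]
          show pvRel prev [x] [if false = true then 0 else x]
          cases prev with
          | none => exact ⟨by simp, by simp, by simp, by simp⟩
          | some d => exact ⟨by simp, by simp, by simp, by simp⟩
      | true =>
          show pvRel prev [if true = true ∧ 0 < x then x - 1 else x] [if true = true then 0 else x]
          cases prev with
          | none => exact ⟨by simp, by simp, by simp, by simp⟩
          | some d => exact ⟨by simp, by simp, by simp, by simp⟩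
  | cons c cs2 ih =>
      intro prev x rs hlen hOk
      obtain ⟨r1, rs2, rfl⟩ : ∃ r1 rs2, rs = r1 :: rs2 := by
        cases rs with
        | nil => simp at hlen
        | cons a b => exact ⟨a, b, rfl⟩
      have hlen2 : rs2.length = cs2.length := by simp at hlen; omega
      have hOk2 : pvOk (some c) (r1 :: rs2) cs2 := hOk.2
      have hQc : pvInQ (some c) [p] = decide (c = p) := by
        show [p].contains c = _
        simp
      have hQd : ∀ d : Char, pvInQ (some d) [p] = true → d = p := by
        intro d hd
        have : [p].contains d = true := hd
        simpa using this
      have hmodstep : ∀ (t1 : Nat) (ts : List Nat),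
          (if c = p ∧ 0 < t1 then t1 - 1 else t1) :: ts = pvMod (pvInQ (some c) [p]) (t1 :: ts) := by
        intro t1 ts
        rw [hQc]
        by_cases hcp' : c = p
        · simp [pvMod, hcp']
        · simp [pvMod, hcp']
      have hZcons : ∀ (y : Nat), pvZ [p] prev (y :: r1 :: rs2) (c :: cs2)
          = (if (pvInQ prev [p] || [p].contains c) = true then 0 else y)
            :: pvZ [p] (some c) (r1 :: rs2) cs2 := fun _ => rfl
      by_cases hfire : c = p ∧ 0 < x ∧ 0 < r1
      · obtain ⟨hcp, hx0, hr10⟩ := hfire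
        rw [pvPass1_cons, if_pos ⟨hcp, hx0, hr10⟩, pvPass2_cons]
        set y := if c = p ∧ 0 < (x - 1) then x - 1 - 1 else x - 1 with hy
        rw [show pvMod (pvInQ prev [p]) (y :: pvPass2 p cs2 (pvPass1 p cs2 ((r1 - 1) :: rs2)))
            = (if pvInQ prev [p] = true ∧ 0 < y then y - 1 else y)
              :: pvPass2 p cs2 (pvPass1 p cs2 ((r1 - 1) :: rs2)) from rfl]
        obtain ⟨t1, ts, ht⟩ : ∃ t1 ts, pvPass2 p cs2 (pvPass1 p cs2 ((r1 - 1) :: rs2)) = t1 :: ts := by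
          have : (pvPass2 p cs2 (pvPass1 p cs2 ((r1 - 1) :: rs2))).length = rs2.length + 1 := by
            rw [pvPass2_len, pvPass1_len]; simp
          cases hE : pvPass2 p cs2 (pvPass1 p cs2 ((r1 - 1) :: rs2)) with
          | nil => rw [hE] at this; simp at this
          | cons a b => exact ⟨a, b, rfl⟩
        rw [ht, pvPass3_cons, hmodstep t1 ts, ← ht]
        have hIH := ih (some c) (r1 - 1) rs2 hlen2
          (pvOk_mono_head (some c) r1 (r1 - 1) rs2 cs2 hOk2 (by omega))
        have hirr : pvZ [p] (some c) ((r1 - 1) :: rs2) cs2 = pvZ [p] (some c) (r1 :: rs2) cs2 := by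
          apply pvZ_head_irrel
          rw [hQc]
          simp [hcp]
        rw [hirr] at hIH
        rw [hZcons]
        refine pvRel_cons prev _ _ _ _ hIH ?_
        intro hne
        -- prev ≠ none: the head entry is internal, so x ≤ 1 and both heads are 0
        obtain ⟨d, rfl⟩ : ∃ d, prev = some d := by
          cases prev with
          | none => exact absurd rfl hne
          | some d => exact ⟨d, rfl⟩
        have hx1 : x ≤ 1 := hOk.1 (by
          show (pvPunctB.contains d || pvPunctB.contains c) = true
          rw [hcp, hpP]
          simp)
        have hxe : x = 1 := by omega
        subst hxe
        have hy0 : y = 0 := by rw [hy]; simp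
        rw [hy0]
        have : ([p].contains c : Bool) = true := by simp [hcp]
        rw [this]
        simp [pvMod]
      · rw [pvPass1_cons, if_neg hfire, pvPass2_cons]
        set y := if c = p ∧ 0 < x then x - 1 else x with hy
        rw [show pvMod (pvInQ prev [p]) (y :: pvPass2 p cs2 (pvPass1 p cs2 (r1 :: rs2)))
            = (if pvInQ prev [p] = true ∧ 0 < y then y - 1 else y)
              :: pvPass2 p cs2 (pvPass1 p cs2 (r1 :: rs2)) from rfl]
        obtain ⟨t1, ts, ht⟩ : ∃ t1 ts, pvPass2 p cs2 (pvPass1 p cs2 (r1 :: rs2)) = t1 :: ts := by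
          have : (pvPass2 p cs2 (pvPass1 p cs2 (r1 :: rs2))).length = rs2.length + 1 := by
            rw [pvPass2_len, pvPass1_len]; simp
          cases hE : pvPass2 p cs2 (pvPass1 p cs2 (r1 :: rs2)) with
          | nil => rw [hE] at this; simp at this
          | cons a b => exact ⟨a, b, rfl⟩
        rw [ht, pvPass3_cons, hmodstep t1 ts, ← ht]
        have hIH := ih (some c) r1 rs2 hlen2 hOk2
        rw [hZcons]
        refine pvRel_cons prev _ _ _ _ hIH ?_
        intro hne
        obtain ⟨d, rfl⟩ : ∃ d, prev = some d := by
          cases prev with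
          | none => exact absurd rfl hne
          | some d => exact ⟨d, rfl⟩
        have hcontains : ([p].contains c : Bool) = decide (c = p) := by simp
        by_cases hcp : c = p
        · have hx1 : x ≤ 1 := hOk.1 (by
            show (pvPunctB.contains d || pvPunctB.contains c) = true
            rw [hcp, hpP]
            simp)
          have hy0 : y = 0 := by
            rw [hy]
            by_cases hx0 : 0 < x
            · simp [hcp, hx0]; omega
            · simp [hcp, hx0]; omega
          rw [hy0, hcontains]
          simp [hcp]
        · have hyx : y = x := by rw [hy]; simp [hcp]
          rw [hyx, hcontains]
          have hdp : (decide (c = p)) = false := by simp [hcp]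
          rw [hdp]
          cases hb : pvInQ (some d) [p] with
          | false => simp
          | true =>
              have hdP : d = p := hQd d hb
              have hx1 : x ≤ 1 := hOk.1 (by
                show (pvPunctB.contains d || pvPunctB.contains c) = true
                rw [hdP, hpP]
                simp)
              simp only [Bool.true_or, if_pos rfl]
              by_cases hx0 : 0 < x
              · simp [hx0]; omega
              · simp [hx0]; omega

-- the full fold of passes is pvZ over the symbol list, up to head/last -------------

theorem pvFoldS : ∀ (ps : List Char), (∀ p ∈ ps, pvPunctB.contains p = true) →
    ∀ (cs : List Char) (rs : List Nat), rs.length = cs.length + 1 → pvOk none rs cs →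
    pvSim (ps.foldl (fun r pc => pvPass3 pc cs (pvPass2 pc cs (pvPass1 pc cs r))) rs)
          (pvZ ps none rs cs) := by
  intro ps
  induction ps with
  | nil =>
      intro _ cs rs hlen _
      rw [pvZ_empty_q]
      exact pvSim_refl rs (by intro h; subst h; simp at hlen)
  | cons p ps ih =>
      intro hps cs rs hlen hOk
      obtain ⟨x, rs', rfl⟩ : ∃ x rs', rs = x :: rs' := by
        cases rs with
        | nil => simp at hlen
        | cons a b => exact ⟨a, b, rfl⟩
      simp only [List.foldl_cons]
      have hstep : pvSim (pvPass3 p cs (pvPass2 p cs (pvPass1 p cs (x :: rs'))))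
          (pvZ [p] none (x :: rs') cs) := by
        have := pvComboS p (hps p (by simp)) cs none x rs' (by simp at hlen; omega) hOk
        rwa [show pvInQ none [p] = false from rfl, pvMod_false] at this
      set u1 := pvPass3 p cs (pvPass2 p cs (pvPass1 p cs (x :: rs'))) with hu1
      have hlen1 : u1.length = cs.length + 1 := by
        rw [hu1, pvPass3_len, pvPass2_len, pvPass1_len]; exact hlen
      have hOkZ : pvOk none (pvZ [p] none (x :: rs') cs) cs := pvOk_Z [p] cs none _ hOk
      have hOk1 : pvOk none u1 cs := pvOk_of_sim cs u1 _ hlen1 hstep hOkZ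
      have hmain := ih (fun q hq => hps q (by simp [hq])) cs u1 hlen1 hOk1
      have hZstep : pvSim (pvZ ps none u1 cs) (pvZ ps none (pvZ [p] none (x :: rs') cs) cs) :=
        pvZ_rel ps cs none u1 _ hstep
      have hfuse : pvZ ps none (pvZ [p] none (x :: rs') cs) cs = pvZ (p :: ps) none (x :: rs') cs :=
        pvZ_fuse [p] ps cs none (x :: rs')
      exact pvSim_trans _ _ _ hmain (hfuse ▸ hZstep)

-- B's subtract rule agrees with the zero rule up to head/last ----------------------

theorem pvW_Z : ∀ (cs : List Char) (prev : Option Char) (rs : List Nat),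
    rs.length = cs.length + 1 → pvOk prev rs cs →
    pvRel prev (pvW prev rs cs) (pvZ pvPunctB prev rs cs) := by
  intro cs
  induction cs with
  | nil =>
      intro prev rs hlen _
      obtain ⟨r, rfl⟩ : ∃ r, rs = [r] := by
        cases rs with
        | nil => simp at hlen
        | cons a b => cases b with
          | nil => exact ⟨a, rfl⟩
          | cons x y => simp at hlen
      show pvRel prev [_] [_]
      cases prev with
      | none => exact ⟨by simp, by simp, by simp, by simp⟩
      | some d => exact ⟨by simp, by simp, by simp, by simp⟩
  | cons c cs2 ih =>
      intro prev rs hlen hOk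
      obtain ⟨r, rs', rfl⟩ : ∃ r rs', rs = r :: rs' := by
        cases rs with
        | nil => simp at hlen
        | cons a b => exact ⟨a, b, rfl⟩
      have hlen' : rs'.length = cs2.length + 1 := by simp at hlen; omega
      have hIH := ih (some c) rs' hlen' hOk.2
      show pvRel prev
        ((r - (if pvInQ prev pvPunctB then 1 else 0) - (if pvPunctB.contains c then 1 else 0))
          :: pvW (some c) rs' cs2)
        ((if (pvInQ prev pvPunctB || pvPunctB.contains c) = true then 0 else r)
          :: pvZ pvPunctB (some c) rs' cs2)
      refine pvRel_cons prev _ _ _ _ hIH ?_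
      intro hne
      obtain ⟨d, rfl⟩ : ∃ d, prev = some d := by
        cases prev with
        | none => exact absurd rfl hne
        | some d => exact ⟨d, rfl⟩
      have hInQ : pvInQ (some d) pvPunctB = pvPunctB.contains d := rfl
      cases hdc : (pvPunctB.contains d || pvPunctB.contains c) with
      | false =>
          have hd : pvPunctB.contains d = false := by
            cases h : pvPunctB.contains d
            · rfl
            · rw [h] at hdc; simp at hdc
          have hc : pvPunctB.contains c = false := by
            cases h : pvPunctB.contains c
            · rfl
            · rw [h] at hdc; simp at hdc
          rw [hInQ, hd, hc]
          simp
      | true =>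
          have hr1 : r ≤ 1 := hOk.1 (by
            show (pvPunctB.contains d || pvPunctB.contains c) = true
            exact hdc)
          rw [hInQ]
          rw [show pvInQ (some d) pvPunctB = pvPunctB.contains d from rfl] at *
          cases hd : pvPunctB.contains d <;> cases hc : pvPunctB.contains c <;>
            rw [hd, hc] at hdc <;> simp_all <;> omega
-- the scan over the decoded string computes the subtract rule ---------------------

theorem pvSpaceNotPunct : pvOptPunct (some ' ') = false := by decide

theorem pvOptPunct_some (c : Char) : pvOptPunct (some c) = pvPunctB.contains c := rfl

theorem pvOptPunct_replicate_head (r : Nat) :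
    pvOptPunct (List.replicate r ' ').head? = false := by
  cases r with
  | zero => rfl
  | succ k => simp [List.replicate_succ, pvOptPunct]; decide

theorem pvScan_tailrun : ∀ (r : Nat), pvScan (some ' ') (List.replicate r ' ') = List.replicate r ' ' := by
  intro r
  induction r with
  | zero => rfl
  | succ k ih =>
      rw [List.replicate_succ]
      conv_lhs => rw [pvScan]
      rw [if_neg (by
        intro h
        have := h.2
        rw [pvSpaceNotPunct, pvOptPunct_replicate_head] at this
        simp at this)]
      rw [ih]

theorem pvScan_run : ∀ (r : Nat) (c : Char) (rest : List Char), c ≠ ' ' →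
    pvScan (some ' ') (List.replicate r ' ' ++ c :: rest)
      = List.replicate (r - (if pvPunctB.contains c then 1 else 0)) ' '
          ++ c :: pvScan (some c) rest := by
  intro r
  induction r with
  | zero =>
      intro c rest hc
      conv_lhs => rw [List.replicate_zero, List.nil_append, pvScan]
      rw [if_neg (by intro h; exact hc h.1)]
      simp
  | succ k ih =>
      intro c rest hc
      rw [List.replicate_succ, List.cons_append]
      cases k with
      | zero =>
          conv_lhs => rw [pvScan]
          simp only [List.replicate_zero, List.nil_append]
          cases hcp : pvPunctB.contains c with
          | true =>
              rw [if_pos ⟨by trivial, by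
                show (pvOptPunct (some ' ') || pvOptPunct (some c)) = true
                rw [pvSpaceNotPunct, pvOptPunct_some, hcp]
                rfl⟩]
              conv_lhs => rw [pvScan]
              rw [if_neg (by intro h; exact hc h.1)]
              simp [hcp]
          | false =>
              rw [if_neg (by
                intro h
                have h2 : (pvOptPunct (some ' ') || pvOptPunct (some c)) = true := h.2
                rw [pvSpaceNotPunct, pvOptPunct_some, hcp] at h2
                simp at h2)]
              conv_lhs => rw [pvScan]
              rw [if_neg (by intro h; exact hc h.1)]
              simp [hcp, List.replicate_succ]
      | succ m =>
          conv_lhs => rw [pvScan]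
          rw [if_neg (by
            intro h
            have h2 := h.2
            rw [pvSpaceNotPunct,
              show ((List.replicate (m + 1) ' ' ++ c :: rest).head? : Option Char) = some ' ' from by
                simp [List.replicate_succ],
              pvOptPunct_some, show pvPunctB.contains ' ' = false from by decide] at h2
            simp at h2)]
          rw [ih c rest hc]
          have harith : m + 1 + 1 - (if pvPunctB.contains c = true then 1 else 0)
              = (m + 1 - (if pvPunctB.contains c = true then 1 else 0)) + 1 := by
            split <;> omega
          rw [harith, List.replicate_succ, List.cons_append]

theorem pvScanW : ∀ (cs : List Char) (prev : Option Char) (rs : List Nat),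
    rs.length = cs.length + 1 → (∀ c ∈ cs, c ≠ ' ') →
    pvScan prev (pvDecode cs rs) = pvDecode cs (pvW prev rs cs) := by
  intro cs
  induction cs with
  | nil =>
      intro prev rs hlen _
      obtain ⟨r, rfl⟩ : ∃ r, rs = [r] := by
        cases rs with
        | nil => simp at hlen
        | cons a b => cases b with
          | nil => exact ⟨a, rfl⟩
          | cons x y => simp at hlen
      have hOpt : pvOptPunct prev = pvInQ prev pvPunctB := by cases prev <;> rfl
      cases r with
      | zero =>
          show pvScan prev [] = pvDecode [] [0 - _]
          simp [pvScan, pvDecode]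
      | succ k =>
          show pvScan prev (List.replicate (k + 1) ' ') = pvDecode [] [k + 1 - _]
          rw [List.replicate_succ]
          conv_lhs => rw [pvScan]
          cases hb : pvInQ prev pvPunctB with
          | true =>
              rw [if_pos ⟨rfl, by rw [hOpt, hb, pvOptPunct_replicate_head]; simp⟩]
              rw [pvScan_tailrun]
              show List.replicate k ' ' = pvDecode [] [k + 1 - 1]
              simp [pvDecode]
          | false =>
              rw [if_neg (by
                intro h
                have := h.2
                rw [hOpt, hb, pvOptPunct_replicate_head] at this
                simp at this)]
              rw [pvScan_tailrun]
              show ' ' :: List.replicate k ' ' = pvDecode [] [k + 1 - 0]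
              simp [pvDecode, List.replicate_succ]
  | cons c cs2 ih =>
      intro prev rs hlen hcs
      obtain ⟨r, rs', rfl⟩ : ∃ r rs', rs = r :: rs' := by
        cases rs with
        | nil => simp at hlen
        | cons a b => exact ⟨a, b, rfl⟩
      have hlen' : rs'.length = cs2.length + 1 := by simp at hlen; omega
      have hc : c ≠ ' ' := hcs c (by simp)
      have hcs' : ∀ x ∈ cs2, x ≠ ' ' := fun x hx => hcs x (by simp [hx])
      have hOpt : pvOptPunct prev = pvInQ prev pvPunctB := by cases prev <;> rfl
      rw [pvDecode_cons]
      show _ = pvDecode (c :: cs2)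
        ((r - (if pvInQ prev pvPunctB then 1 else 0) - (if pvPunctB.contains c then 1 else 0))
          :: pvW (some c) rs' cs2)
      rw [pvDecode_cons, ← ih (some c) rs' hlen' hcs']
      cases r with
      | zero =>
          simp only [List.replicate_zero, List.nil_append, Nat.zero_sub]
          conv_lhs => rw [pvScan]
          rw [if_neg (by intro h; exact hc h.1)]
      | succ k =>
          rw [List.replicate_succ, List.cons_append]
          conv_lhs => rw [pvScan]
          cases k with
          | zero =>
              simp only [List.replicate_zero, List.nil_append]
              cases hbp : pvInQ prev pvPunctB <;> cases hbc : pvPunctB.contains c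
              · -- neither neighbor punct: keep the space
                rw [if_neg (by
                  intro h
                  have h2 : (pvOptPunct prev || pvOptPunct (some c)) = true := h.2
                  rw [hOpt, hbp, pvOptPunct_some, hbc] at h2
                  simp at h2)]
                conv_lhs => rw [pvScan]
                rw [if_neg (by intro h; exact hc h.1)]
                simp [List.replicate_succ]
              · -- right neighbor punct: drop
                rw [if_pos ⟨by trivial, by
                  show (pvOptPunct prev || pvOptPunct (some c)) = true
                  rw [hOpt, hbp, pvOptPunct_some, hbc]
                  rfl⟩]
                conv_lhs => rw [pvScan]
                rw [if_neg (by intro h; exact hc h.1)]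
                simp
              · -- left neighbor punct: drop
                rw [if_pos ⟨by trivial, by
                  show (pvOptPunct prev || pvOptPunct (some c)) = true
                  rw [hOpt, hbp]
                  rfl⟩]
                conv_lhs => rw [pvScan]
                rw [if_neg (by intro h; exact hc h.1)]
                simp
              · -- both punct, a single space: drop once
                rw [if_pos ⟨by trivial, by
                  show (pvOptPunct prev || pvOptPunct (some c)) = true
                  rw [hOpt, hbp]
                  rfl⟩]
                conv_lhs => rw [pvScan]
                rw [if_neg (by intro h; exact hc h.1)]
                simp
          | succ m =>
              cases hb : pvInQ prev pvPunctB with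
              | true =>
                  rw [if_pos ⟨by trivial, by
                    rw [hOpt, hb]
                    rfl⟩]
                  rw [pvScan_run (m + 1) c _ hc]
                  have harith : m + 1 + 1 - 1 - (if pvPunctB.contains c = true then 1 else 0)
                      = m + 1 - (if pvPunctB.contains c = true then 1 else 0) := by
                    split <;> omega
                  rw [show (if (true : Bool) = true then 1 else 0) = 1 from rfl, harith]
              | false =>
                  rw [if_neg (by
                    intro h
                    have h2 := h.2
                    rw [hOpt, hb,
                      show ((List.replicate (m + 1) ' ' ++ c :: pvDecode cs2 rs').head? : Option Char)
                        = some ' ' from by simp [List.replicate_succ],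
                      pvOptPunct_some, show pvPunctB.contains ' ' = false from by decide] at h2
                    simp at h2)]
                  rw [pvScan_run (m + 1) c _ hc]
                  have harith : m + 1 + 1 - (if (false : Bool) = true then 1 else 0)
                        - (if pvPunctB.contains c = true then 1 else 0)
                      = (m + 1 - (if pvPunctB.contains c = true then 1 else 0)) + 1 := by
                    cases hcc : pvPunctB.contains c <;> simp <;> omega
                  rw [harith, List.replicate_succ, List.cons_append]

-- strip absorbs replicated spaces at either end ------------------------------------

theorem pvIsspace_space : PySem.Chars.isspace ' ' = true := by decide

theorem pvDropWhile_rep (a : Nat) (l : List Char) :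
    (List.replicate a ' ' ++ l).dropWhile PySem.Chars.isspace = l.dropWhile PySem.Chars.isspace := by
  induction a with
  | zero => simp
  | succ k ih => rw [List.replicate_succ, List.cons_append, List.dropWhile_cons_of_pos pvIsspace_space, ih]

theorem pvLstrip_rep (a : Nat) (l : List Char) :
    PySem.Chars.lstrip (List.replicate a ' ' ++ l) = PySem.Chars.lstrip l := by
  show (List.replicate a ' ' ++ l).dropWhile PySem.Chars.isspace = l.dropWhile PySem.Chars.isspace
  exact pvDropWhile_rep a l

theorem pvRstrip_rep (a : Nat) (l : List Char) :
    PySem.Chars.rstrip (l ++ List.replicate a ' ') = PySem.Chars.rstrip l := by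
  show ((l ++ List.replicate a ' ').reverse.dropWhile PySem.Chars.isspace).reverse
      = (l.reverse.dropWhile PySem.Chars.isspace).reverse
  rw [List.reverse_append, List.reverse_replicate, pvDropWhile_rep]

theorem pvStrip_rep_front (a : Nat) (l : List Char) :
    PySem.Chars.strip (List.replicate a ' ' ++ l) = PySem.Chars.strip l := by
  show PySem.Chars.rstrip (PySem.Chars.lstrip _) = PySem.Chars.rstrip (PySem.Chars.lstrip _)
  rw [pvLstrip_rep]

theorem pvStrip_rep_back (a : Nat) (l : List Char) :
    PySem.Chars.strip (l ++ List.replicate a ' ') = PySem.Chars.strip l := by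
  show PySem.Chars.rstrip (PySem.Chars.lstrip (l ++ List.replicate a ' '))
      = PySem.Chars.rstrip (PySem.Chars.lstrip l)
  show PySem.Chars.rstrip ((l ++ List.replicate a ' ').dropWhile PySem.Chars.isspace)
      = PySem.Chars.rstrip (l.dropWhile PySem.Chars.isspace)
  rw [List.dropWhile_append]
  split
  · rename_i hEmpty
    rw [show (List.replicate a ' ').dropWhile PySem.Chars.isspace = [] from by
      simpa using pvDropWhile_rep a []]
    have : l.dropWhile PySem.Chars.isspace = [] := by
      simpa using hEmpty
    rw [this]
  · exact pvRstrip_rep a _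

-- two run lists that agree except at the ends decode to strip-equal strings --------

theorem pvDecode_sim2_decomp : ∀ (cs : List Char) (u v : List Nat),
    u.length = cs.length + 1 → pvSim2 u v →
    ∃ D a b, pvDecode cs u = D ++ List.replicate a ' ' ∧ pvDecode cs v = D ++ List.replicate b ' ' := by
  intro cs
  induction cs with
  | nil =>
      intro u v hlen h2
      obtain ⟨a, rfl⟩ : ∃ a, u = [a] := by
        cases u with
        | nil => simp at hlen
        | cons x y => cases y with
          | nil => exact ⟨x, rfl⟩
          | cons p q => simp at hlen
      obtain ⟨b, rfl⟩ : ∃ b, v = [b] := by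
        have := pvSim2_len _ _ h2
        cases v with
        | nil => simp at this
        | cons x y => cases y with
          | nil => exact ⟨x, rfl⟩
          | cons p q => simp at this
      exact ⟨[], a, b, by simp [pvDecode], by simp [pvDecode]⟩
  | cons c cs2 ih =>
      intro u v hlen h2
      obtain ⟨x, u', rfl⟩ : ∃ x u', u = x :: u' := by
        cases u with
        | nil => simp at hlen
        | cons a b => exact ⟨a, b, rfl⟩
      have hu' : u' ≠ [] := by intro h; subst h; simp at hlen
      obtain ⟨y, v', rfl⟩ : ∃ y v', v = y :: v' := by
        cases v with
        | nil => exact absurd rfl h2.2.1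
        | cons a b => exact ⟨a, b, rfl⟩
      obtain ⟨hxy, h2'⟩ := pvSim2_cons_elim x y u' v' h2 hu'
      obtain ⟨D, a, b, hDu, hDv⟩ := ih u' v' (by simpa using hlen) h2'
      refine ⟨List.replicate x ' ' ++ c :: D, a, b, ?_, ?_⟩
      · rw [pvDecode_cons, hDu]; simp
      · rw [pvDecode_cons, hDv, hxy]; simp

theorem pvStrip_rep_nil (a : Nat) : PySem.Chars.strip (List.replicate a ' ') = [] := by
  have := pvStrip_rep_front a []
  simpa using this

theorem pvStrip_sim : ∀ (cs : List Char) (u v : List Nat),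
    u.length = cs.length + 1 → pvSim u v →
    PySem.Chars.strip (pvDecode cs u) = PySem.Chars.strip (pvDecode cs v) := by
  intro cs u v hlen hs
  obtain ⟨x, u', rfl⟩ : ∃ x u', u = x :: u' := by
    cases u with
    | nil => exact absurd rfl hs.1
    | cons a b => exact ⟨a, b, rfl⟩
  obtain ⟨y, v', rfl⟩ : ∃ y v', v = y :: v' := by
    cases v with
    | nil => exact absurd rfl hs.2.1
    | cons a b => exact ⟨a, b, rfl⟩
  cases cs with
  | nil =>
      have : u' = [] := by simpa using hlen
      subst this
      have : v' = [] := by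
        have := pvSim_len _ _ hs
        simpa using this
      subst this
      show PySem.Chars.strip (List.replicate x ' ') = PySem.Chars.strip (List.replicate y ' ')
      rw [pvStrip_rep_nil, pvStrip_rep_nil]
  | cons c cs2 =>
      have hu' : u' ≠ [] := by intro h; subst h; simp at hlen
      have h2 : pvSim2 u' v' := pvSim_cons_elim x y u' v' hs hu'
      obtain ⟨D, a, b, hDu, hDv⟩ := pvDecode_sim2_decomp cs2 u' v' (by simpa using hlen) h2
      rw [pvDecode_cons, pvDecode_cons, pvStrip_rep_front, pvStrip_rep_front, hDu, hDv]
      rw [show (c :: (D ++ List.replicate a ' ') : List Char) = (c :: D) ++ List.replicate a ' ' from by simp]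
      rw [show (c :: (D ++ List.replicate b ' ') : List Char) = (c :: D) ++ List.replicate b ' ' from by simp]
      rw [pvStrip_rep_back, pvStrip_rep_back]
-- infix helpers -------------------------------------------------------------------

theorem pvInfix_left (l X Y : List Char) (h : l <:+: X) : l <:+: Y ++ X :=
  h.trans (List.suffix_append Y X).isInfix

-- a violation of the one-sided bound places '  p' into the decoded string ----------

theorem pvPatR : ∀ (cs : List Char) (rs : List Nat), rs.length = cs.length + 1 →
    ¬ pvOkR false rs cs →
    ∃ p, pvPunctB.contains p = true ∧ [' ', ' ', p] <:+: pvDecode cs rs := by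
  intro cs
  induction cs with
  | nil =>
      intro rs _ hn
      exact absurd (by cases rs <;> trivial) hn
  | cons c cs2 ih =>
      intro rs hlen hn
      obtain ⟨r, rs', rfl⟩ : ∃ r rs', rs = r :: rs' := by
        cases rs with
        | nil => simp at hlen
        | cons a b => exact ⟨a, b, rfl⟩
      have hlen' : rs'.length = cs2.length + 1 := by simp at hlen; omega
      by_cases hbad : pvPunctB.contains c = true ∧ 2 ≤ r
      · obtain ⟨hcont, hr2⟩ := hbad
        refine ⟨c, hcont, List.replicate (r - 2) ' ', pvDecode cs2 rs', ?_⟩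
        show List.replicate (r - 2) ' ' ++ [' ', ' ', c] ++ pvDecode cs2 rs'
            = pvDecode (c :: cs2) (r :: rs')
        rw [pvDecode_cons]
        rw [show ([' ', ' ', c] : List Char) = [' ', ' '] ++ [c] from rfl]
        rw [← List.append_assoc]
        rw [show (List.replicate (r - 2) ' ' ++ [' ', ' '] : List Char) = List.replicate r ' ' from by
          rw [show ([' ', ' '] : List Char) = List.replicate 2 ' ' from rfl, ← List.replicate_add]
          congr 1
          omega]
        simp
      · have hA : (false = false → pvPunctB.contains c = true → r ≤ 1) := by
          intro _ hcont
          by_contra hgt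
          exact hbad ⟨hcont, by omega⟩
        have hB : ¬ pvOkR false rs' cs2 := by
          intro hB
          exact hn ⟨hA, hB⟩
        obtain ⟨p, hp, hinf⟩ := ih rs' hlen' hB
        refine ⟨p, hp, ?_⟩
        rw [pvDecode_cons, show (List.replicate r ' ' ++ c :: pvDecode cs2 rs' : List Char)
            = (List.replicate r ' ' ++ [c]) ++ pvDecode cs2 rs' from by simp]
        exact pvInfix_left _ _ _ hinf

theorem pvDropWhileSp_rep (a : Nat) (l : List Char) :
    (List.replicate a ' ' ++ l).dropWhile (· = ' ') = l.dropWhile (· = ' ') := by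
  induction a with
  | zero => simp
  | succ k ih => rw [List.replicate_succ, List.cons_append,
      List.dropWhile_cons_of_pos (by simp), ih]

theorem pvOkR_of_nopat : ∀ (cs : List Char) (rs : List Nat), rs.length = cs.length + 1 →
    (∀ c ∈ cs, c ≠ ' ') →
    (∀ p, pvPunctB.contains p = true →
      ¬ ([' ', ' ', p] <:+: (pvDecode cs rs).dropWhile (· = ' '))) →
    pvOkR true rs cs := by
  intro cs rs hlen hcs hno
  cases cs with
  | nil => cases rs <;> trivial
  | cons c cs2 =>
      obtain ⟨r, rs', rfl⟩ : ∃ r rs', rs = r :: rs' := by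
        cases rs with
        | nil => simp at hlen
        | cons a b => exact ⟨a, b, rfl⟩
      have hc : c ≠ ' ' := hcs c (by simp)
      refine ⟨by intro h; simp at h, ?_⟩
      by_contra hB
      obtain ⟨p, hp, hinf⟩ := pvPatR cs2 rs' (by simp at hlen; omega) hB
      refine hno p hp ?_
      rw [pvDecode_cons, pvDropWhileSp_rep, List.dropWhile_cons_of_neg (by simpa using hc)]
      rw [show (c :: pvDecode cs2 rs' : List Char) = [c] ++ pvDecode cs2 rs' from rfl]
      exact pvInfix_left _ _ _ hinf

-- indexed characterisations, to combine the two one-sided bounds -------------------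

theorem pvOkR_iff : ∀ (cs : List Char) (b : Bool) (rs : List Nat),
    pvOkR b rs cs ↔
      (∀ i : Nat, i < cs.length → i < rs.length → (b = true → 1 ≤ i) →
        pvPunctB.contains (cs.getD i ' ') = true → rs.getD i 0 ≤ 1) := by
  intro cs
  induction cs with
  | nil =>
      intro b rs
      constructor
      · intro _ i hic; simp at hic
      · intro _; cases rs <;> trivial
  | cons c cs2 ih =>
      intro b rs
      cases rs with
      | nil =>
          constructor
          · intro _ i _ hir; simp at hir
          · intro _; trivial
      | cons r rs' =>
          constructor
          · rintro ⟨h1, h2⟩ i hic hir hb hcont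
            cases i with
            | zero =>
                cases b with
                | true => exact absurd (hb rfl) (by omega)
                | false =>
                    simp only [List.getD_cons_zero] at hcont ⊢
                    exact h1 rfl hcont
            | succ j =>
                simp only [List.getD_cons_succ] at hcont ⊢
                exact (ih false rs').mp h2 j (by simp only [List.length_cons] at hic; omega)
                  (by simp only [List.length_cons] at hir; omega) (by intro h; cases h) hcont
          · intro h
            refine ⟨?_, ?_⟩
            · intro hbf hcont
              have := h 0 (by simp) (by simp)
                (by intro hbt; rw [hbf] at hbt; cases hbt)
              simp only [List.getD_cons_zero] at this
              exact this hcont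
            · refine (ih false rs').mpr ?_
              intro j hic hir _ hcont
              have := h (j + 1) (by simp only [List.length_cons]; omega)
                (by simp only [List.length_cons]; omega) (by intro _; omega)
              simp only [List.getD_cons_succ] at this
              exact this hcont

theorem pvOk_some_iff : ∀ (cs : List Char) (d : Char) (rs : List Nat),
    pvOk (some d) rs cs ↔
      (∀ i : Nat, i < cs.length → i < rs.length →
        ((pvPunctB.contains (if 1 ≤ i then cs.getD (i - 1) ' ' else d)
          || pvPunctB.contains (cs.getD i ' ')) = true) → rs.getD i 0 ≤ 1) := by
  intro cs
  induction cs with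
  | nil =>
      intro d rs
      constructor
      · intro _ i hic; simp at hic
      · intro _; cases rs <;> trivial
  | cons c cs2 ih =>
      intro d rs
      cases rs with
      | nil =>
          constructor
          · intro _ i _ hir; simp at hir
          · intro _; trivial
      | cons r rs' =>
          constructor
          · rintro ⟨h1, h2⟩ i hic hir hg
            cases i with
            | zero =>
                simp only [List.getD_cons_zero] at hg ⊢
                rw [if_neg (by omega)] at hg
                exact h1 hg
            | succ j =>
                simp only [List.getD_cons_succ] at hg ⊢
                rw [if_pos (by omega : 1 ≤ j + 1)] at hg
                refine (ih c rs').mp h2 j (by simp only [List.length_cons] at hic; omega)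
                  (by simp only [List.length_cons] at hir; omega) ?_
                by_cases hj : 1 ≤ j
                · rw [if_pos hj]
                  obtain ⟨k, rfl⟩ : ∃ k, j = k + 1 := ⟨j - 1, by omega⟩
                  simpa using hg
                · have hj0 : j = 0 := by omega
                  subst hj0
                  rw [if_neg hj]
                  simpa using hg
          · intro h
            refine ⟨?_, ?_⟩
            · intro hg
              have := h 0 (by simp) (by simp)
              simp only [List.getD_cons_zero] at this
              rw [if_neg (by omega)] at this
              exact this hg
            · refine (ih c rs').mpr ?_
              intro j hic hir hg
              have := h (j + 1) (by simp only [List.length_cons]; omega)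
                (by simp only [List.length_cons]; omega)
              simp only [List.getD_cons_succ] at this
              rw [if_pos (by omega : 1 ≤ j + 1)] at this
              refine this ?_
              by_cases hj : 1 ≤ j
              · rw [if_pos hj] at hg
                obtain ⟨k, rfl⟩ : ∃ k, j = k + 1 := ⟨j - 1, by omega⟩
                simpa using hg
              · have hj0 : j = 0 := by omega
                subst hj0
                rw [if_neg hj] at hg
                simpa using hg

theorem pvOk_none_iff : ∀ (cs : List Char) (rs : List Nat),
    pvOk none rs cs ↔
      (∀ i : Nat, 1 ≤ i → i < cs.length → i < rs.length →
        ((pvPunctB.contains (cs.getD (i - 1) ' ')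
          || pvPunctB.contains (cs.getD i ' ')) = true) → rs.getD i 0 ≤ 1) := by
  intro cs rs
  cases cs with
  | nil =>
      constructor
      · intro _ i _ hic; simp at hic
      · intro _; cases rs <;> trivial
  | cons c cs2 =>
      cases rs with
      | nil =>
          constructor
          · intro _ i _ _ hir; simp at hir
          · intro _; trivial
      | cons r rs' =>
          constructor
          · rintro ⟨_, h2⟩ i h1 hic hir hg
            obtain ⟨j, rfl⟩ : ∃ j, i = j + 1 := ⟨i - 1, by omega⟩
            simp only [List.getD_cons_succ] at hg ⊢
            refine (pvOk_some_iff cs2 c rs').mp h2 j (by simp only [List.length_cons] at hic; omega)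
              (by simp only [List.length_cons] at hir; omega) ?_
            by_cases hj : 1 ≤ j
            · rw [if_pos hj]
              obtain ⟨k, rfl⟩ : ∃ k, j = k + 1 := ⟨j - 1, by omega⟩
              simpa using hg
            · have hj0 : j = 0 := by omega
              subst hj0
              rw [if_neg hj]
              simpa using hg
          · intro h
            refine ⟨by intro hg; simp [pvGuard] at hg, ?_⟩
            refine (pvOk_some_iff cs2 c rs').mpr ?_
            intro j hic hir hg
            have := h (j + 1) (by omega) (by simp only [List.length_cons]; omega)
              (by simp only [List.length_cons]; omega)
            simp only [List.getD_cons_succ] at this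
            refine this ?_
            by_cases hj : 1 ≤ j
            · rw [if_pos hj] at hg
              obtain ⟨k, rfl⟩ : ∃ k, j = k + 1 := ⟨j - 1, by omega⟩
              simpa using hg
            · have hj0 : j = 0 := by omega
              subst hj0
              rw [if_neg hj] at hg
              simpa using hg

theorem pvOk_of_okR (cs : List Char) (rs : List Nat) (hlen : rs.length = cs.length + 1)
    (h1 : pvOkR true rs cs) (h2 : pvOkR true rs.reverse cs.reverse) : pvOk none rs cs := by
  rw [pvOk_none_iff]
  intro i hi1 hic hir hg
  rcases Bool.or_eq_true_iff.mp hg with hgr | hgr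
  · have hj1 : cs.length - i < cs.reverse.length := by simp only [List.length_reverse]; omega
    have hj2 : cs.length - i < rs.reverse.length := by simp only [List.length_reverse]; omega
    have hmain := (pvOkR_iff cs.reverse true rs.reverse).mp h2 (cs.length - i) hj1 hj2
      (by intro _; omega)
    have hcge : cs.reverse.getD (cs.length - i) ' ' = cs.getD (i - 1) ' ' := by
      rw [List.getD_eq_getElem _ _ hj1, List.getD_eq_getElem _ _ (by omega : i - 1 < cs.length)]
      rw [List.getElem_reverse]
      congr 1
      omega
    have hrge : rs.reverse.getD (cs.length - i) 0 = rs.getD i 0 := by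
      rw [List.getD_eq_getElem _ _ hj2, List.getD_eq_getElem _ _ (by omega : i < rs.length)]
      rw [List.getElem_reverse]
      congr 1
      omega
    rw [hcge, hrge] at hmain
    exact hmain hgr
  · exact (pvOkR_iff cs true rs).mp h1 i hic hir (by intro _; omega) hgr

-- run-length encodings reverse pointwise -------------------------------------------

theorem pvDecode_snoc : ∀ (cs : List Char) (rs : List Nat) (c : Char) (r : Nat),
    rs.length = cs.length + 1 →
    pvDecode (cs ++ [c]) (rs ++ [r]) = pvDecode cs rs ++ c :: List.replicate r ' ' := by
  intro cs
  induction cs with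
  | nil =>
      intro rs c r hlen
      obtain ⟨r0, rfl⟩ : ∃ r0, rs = [r0] := by
        cases rs with
        | nil => simp at hlen
        | cons a b => cases b with
          | nil => exact ⟨a, rfl⟩
          | cons x y => simp at hlen
      show pvDecode [c] [r0, r] = pvDecode [] [r0] ++ c :: List.replicate r ' '
      simp [pvDecode]
  | cons c0 cs2 ih =>
      intro rs c r hlen
      obtain ⟨r0, rs', rfl⟩ : ∃ r0 rs', rs = r0 :: rs' := by
        cases rs with
        | nil => simp at hlen
        | cons a b => exact ⟨a, b, rfl⟩
      show pvDecode (c0 :: (cs2 ++ [c])) (r0 :: (rs' ++ [r])) = _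
      rw [pvDecode_cons, ih rs' c r (by simp at hlen; omega), pvDecode_cons]
      simp

theorem pvDecode_reverse : ∀ (cs : List Char) (rs : List Nat), rs.length = cs.length + 1 →
    (pvDecode cs rs).reverse = pvDecode cs.reverse rs.reverse := by
  intro cs
  induction cs with
  | nil =>
      intro rs hlen
      obtain ⟨r, rfl⟩ : ∃ r, rs = [r] := by
        cases rs with
        | nil => simp at hlen
        | cons a b => cases b with
          | nil => exact ⟨a, rfl⟩
          | cons x y => simp at hlen
      show (List.replicate r ' ').reverse = pvDecode [] [r]
      simp [pvDecode]
  | cons c cs2 ih =>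
      intro rs hlen
      obtain ⟨r, rs', rfl⟩ : ∃ r rs', rs = r :: rs' := by
        cases rs with
        | nil => simp at hlen
        | cons a b => exact ⟨a, b, rfl⟩
      have hlen' : rs'.length = cs2.length + 1 := by simp at hlen; omega
      rw [pvDecode_cons, List.reverse_cons, List.reverse_cons]
      rw [pvDecode_snoc cs2.reverse rs'.reverse c r (by simp [hlen'])]
      rw [← ih rs' hlen']
      simp
theorem pvFold_len (ps : List Char) : ∀ (cs : List Char) (rs : List Nat),
    (ps.foldl (fun r pc => pvPass3 pc cs (pvPass2 pc cs (pvPass1 pc cs r))) rs).length = rs.length := by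
  induction ps with
  | nil => intro cs rs; rfl
  | cons p ps ih =>
      intro cs rs
      simp only [List.foldl_cons]
      rw [ih, pvPass3_len, pvPass2_len, pvPass1_len]

-- ===== VERDICT (by name: the statement is the Claim_ definition above) =====
set_option maxRecDepth 8192 in
theorem reconstruct_line_spec : Claim_equal_reconstruct_line := by
  intro tokens indent _ hpre
  unfold Spec_reconstruct_line reconstruct_line reconstruct_line_alt
  simp only []
  have hstep : ∀ (st : List Char) (i : Char),
      PySem.Chars.replace (PySem.Chars.replace (PySem.Chars.replace st [' ', i, ' '] [i]) [' ', i] [i]) [i, ' '] [i]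
        = pvRepl [i, ' '] [i] (pvRepl [' ', i] [i] (pvRepl [' ', i, ' '] [i] st)) := by
    intro st i
    rw [replace_eq_pvRepl _ _ _ (by simp), replace_eq_pvRepl _ _ _ (by simp),
      replace_eq_pvRepl _ _ _ (by simp)]
  set s0 := PySem.Chars.join [' '] (tokens.map String.toList) with hs0
  have hfold : pvPunct.foldl (fun s i =>
      PySem.Chars.replace (PySem.Chars.replace (PySem.Chars.replace s [' ', i, ' '] [i]) [' ', i] [i]) [i, ' '] [i]) s0
      = pvPunct.foldl (fun s i => pvRepl [i, ' '] [i] (pvRepl [' ', i] [i] (pvRepl [' ', i, ' '] [i] s))) s0 := by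
    apply List.foldl_ext
    intro a x _
    exact hstep a x
  have hdec : pvDecode (pvParse s0 0).1 (pvParse s0 0).2 = s0 := by
    simpa using pvParse_decode s0 0
  set cs := (pvParse s0 0).1 with hcs
  set rs := (pvParse s0 0).2 with hrs
  have hlen : rs.length = cs.length + 1 := pvParse_len s0 0
  have hns : ∀ c ∈ cs, c ≠ ' ' := fun c hc => pvParse_nonspace s0 0 c hc
  -- Pre_ gives pattern-freedom on both ends
  have hforall := List.all_eq_true.mp hpre
  have hnopat1 : ∀ p, pvPunctB.contains p = true →
      ¬ ([' ', ' ', p] <:+: (pvDecode cs rs).dropWhile (· = ' ')) := by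
    intro p hp
    have hmem : p ∈ pvPunctB := by simpa using hp
    have := hforall p hmem
    rw [Bool.and_eq_true, Bool.not_eq_eq_eq_not, Bool.not_eq_eq_eq_not] at this
    have h1 := this.1
    rw [hdec]
    exact (PySem.Chars.isIn_eq_false_iff _ _).mp (by simpa using h1)
  have hnopat2 : ∀ p, pvPunctB.contains p = true →
      ¬ ([' ', ' ', p] <:+: (pvDecode cs.reverse rs.reverse).dropWhile (· = ' ')) := by
    intro p hp
    have hmem : p ∈ pvPunctB := by simpa using hp
    have := hforall p hmem
    rw [Bool.and_eq_true, Bool.not_eq_eq_eq_not, Bool.not_eq_eq_eq_not] at this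
    have h2 := this.2
    rw [← pvDecode_reverse cs rs hlen, hdec]
    exact (PySem.Chars.isIn_eq_false_iff _ _).mp (by simpa using h2)
  have hOkR1 : pvOkR true rs cs := pvOkR_of_nopat cs rs hlen hns hnopat1
  have hOkR2 : pvOkR true rs.reverse cs.reverse :=
    pvOkR_of_nopat cs.reverse rs.reverse (by simp [hlen])
      (fun c hc => hns c (List.mem_reverse.mp hc)) hnopat2
  have hOk : pvOk none rs cs := pvOk_of_okR cs rs hlen hOkR1 hOkR2
  -- A's fold acts on the encoding
  have hcore : pvPunct.foldl (fun s i => pvRepl [i, ' '] [i] (pvRepl [' ', i] [i] (pvRepl [' ', i, ' '] [i] s))) s0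
      = pvDecode cs
          (pvPunct.foldl (fun r p => pvPass3 p cs (pvPass2 p cs (pvPass1 p cs r))) rs) := by
    conv_lhs => rw [← hdec]
    exact pvChain pvPunct (by simp [pvPunct]) cs rs hns hlen
  set RS := pvPunct.foldl (fun r p => pvPass3 p cs (pvPass2 p cs (pvPass1 p cs r))) rs with hRS
  have hlenRS : RS.length = cs.length + 1 := by rw [hRS, pvFold_len]; exact hlen
  have hsimA : pvSim RS (pvZ pvPunctB none rs cs) := by
    have := pvFoldS pvPunct (by intro p hp; fin_cases hp <;> rfl) cs rs hlen hOk
    rwa [pvZ_punct_eq] at this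
  -- B's scan acts on the encoding
  have hscan : pvScan none s0 = pvDecode cs (pvW none rs cs) := by
    conv_lhs => rw [← hdec]
    exact pvScanW cs none rs hlen hns
  have hsimW : pvSim (pvW none rs cs) (pvZ pvPunctB none rs cs) := pvW_Z cs none rs hlen hOk
  have hsim : pvSim RS (pvW none rs cs) :=
    pvSim_trans _ _ _ hsimA (pvSim_symm _ _ hsimW)
  have hstrip := pvStrip_sim cs RS (pvW none rs cs) hlenRS hsim
  rw [hfold, hcore, hscan, hstrip]
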